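-- pv_equiv track=rewrite | github.com/osoc21/Future-of-Work | backend/src/demand.py | extractInfoFormulas
-- ===== SOURCE A (Python) =====
-- operators = {"*","+","**","-","log"}
--
-- def extractInfoFormulas(formulas):
--     '''Extract the info from the formulas'''
--     # A set for the parameters, operators and coefficients
--     parameterSet = set()
--     operatorSet = set()
--     coefficientSet = set()
--     # Go over each formula
--     for formula in formulas:
--         # Go over each string
--         for string in formula.split():
--             # Look whether the string is in the operators
--             if string in operators:
--                 operatorSet.add(string)
--             # Look whether the string is a float or numeric
--             elif string.replace('.', '', 1).isdigit():
--                 coefficientSet.add(string)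
--             # Add it to the parameters otherwise
--             else:
--                 parameterSet.add(string)
--     return {
--         "parameters":parameterSet,
--         "operators":operatorSet,
--         "coefficients":coefficientSet
--         }
-- ===== SOURCE B (Python) =====
-- operators = {"*","+","**","-","log"}
--
-- def extractInfoFormulas(formulas):
--     '''Extract the info from the formulas'''
--     # Collect every distinct token first, then partition that index into the
--     # three categories by set operations.
--     tokens = {t for formula in formulas for t in formula.split()}
--     operatorSet = tokens & operators
--     coefficientSet = {t for t in tokens if t.replace('.', '', 1).isdigit()}
--     parameterSet = tokens - operatorSet - coefficientSet
--     return {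
--         "parameters": parameterSet,
--         "operators": operatorSet,
--         "coefficients": coefficientSet
--         }
-- ===== Notes on version B (the rewrite author's own statement) =====
-- stated objective: simpler
-- what changed: Instead of A's single pass with an if/elif/else classifier pushing each token into one of three accumulated sets, B first flattens all formulas into one set of distinct tokens and then derives the three output sets from it by set intersection, a filter, and set difference.
import Mathlib
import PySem

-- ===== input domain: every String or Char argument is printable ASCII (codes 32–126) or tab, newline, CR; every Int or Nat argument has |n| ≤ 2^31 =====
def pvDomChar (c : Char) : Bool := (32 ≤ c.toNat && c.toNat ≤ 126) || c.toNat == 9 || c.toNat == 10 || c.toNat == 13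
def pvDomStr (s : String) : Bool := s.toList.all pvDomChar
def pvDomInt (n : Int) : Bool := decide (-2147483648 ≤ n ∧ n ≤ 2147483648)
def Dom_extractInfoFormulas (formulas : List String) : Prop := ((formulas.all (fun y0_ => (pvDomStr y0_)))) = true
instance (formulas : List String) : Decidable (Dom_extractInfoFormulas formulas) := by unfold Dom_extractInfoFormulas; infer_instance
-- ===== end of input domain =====

-- B replaces A's one-pass if/elif/else classifier by building one set of distinct
-- tokens and partitioning it with set operations (objective: simpler decomposition).

-- shared helpers: the module-level 'operators' set and the token numeric test
-- (both Pythons use the same literals/test)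
def pvOperators : PySem.Set String := PySem.Set.ofList ["*", "+", "**", "-", "log"]

-- hand port of s.replace('.', '', 1): exact — with count 1 and new = "", Python
-- removes the first occurrence of '.' (a single char) and leaves the rest
def pvRemoveFirstDot : List Char → List Char
  | [] => []
  | c :: cs => if c = '.' then cs else c :: pvRemoveFirstDot cs

-- string.replace('.', '', 1).isdigit()
def pvIsNum (s : String) : Bool := PySem.Chars.strIsdigit (pvRemoveFirstDot s.toList)

-- ===== PORT A =====
def pvStepA (st : PySem.Set String × PySem.Set String × PySem.Set String) (tok : String) :
    PySem.Set String × PySem.Set String × PySem.Set String :=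
  if PySem.Set.contains pvOperators tok then (st.1, PySem.Set.add st.2.1 tok, st.2.2)
  else if pvIsNum tok then (st.1, st.2.1, PySem.Set.add st.2.2 tok)
  else (PySem.Set.add st.1 tok, st.2.1, st.2.2)

def extractInfoFormulas (formulas : List String) : List (String × List String) :=
  let st := formulas.foldl
    (fun st formula => (PySem.Str.split₀ formula).foldl pvStepA st)
    (PySem.Set.empty, PySem.Set.empty, PySem.Set.empty)
  [("parameters", st.1), ("operators", st.2.1), ("coefficients", st.2.2)]

-- ===== PORT B =====
def extractInfoFormulas_alt (formulas : List String) : List (String × List String) :=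
  -- {t for formula in formulas for t in formula.split()}
  let tokens : PySem.Set String :=
    formulas.foldl (fun acc formula => (PySem.Str.split₀ formula).foldl PySem.Set.add acc)
      PySem.Set.empty
  let operatorSet := PySem.Set.inter tokens pvOperators
  -- set comprehension filtering an existing set (result order cannot be observed)
  let coefficientSet := tokens.filter pvIsNum
  let parameterSet := PySem.Set.diff (PySem.Set.diff tokens operatorSet) coefficientSet
  [("parameters", parameterSet), ("operators", operatorSet), ("coefficients", coefficientSet)]

-- ===== PRECONDITION & SPEC =====
def Spec_extractInfoFormulas (formulas : List String) (out : List (String × List String)) : Prop := out = extractInfoFormulas_alt formulas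
instance (formulas : List String) (out : List (String × List String)) : Decidable (Spec_extractInfoFormulas formulas out) := by unfold Spec_extractInfoFormulas; infer_instance

-- ===== CLAIM (what is proved, stated in full; the proofs are below) =====
def Claim_equal_extractInfoFormulas : Prop := ∀ (formulas : List String), Dom_extractInfoFormulas formulas → Spec_extractInfoFormulas formulas (extractInfoFormulas formulas)

-- ===== LEMMAS AND PROOFS =====

-- the three branch predicates of A, as filters
def pvIsOp (t : String) : Bool := PySem.Set.contains pvOperators t
def pvIsCoef (t : String) : Bool := !pvIsOp t && pvIsNum t
def pvIsParam (t : String) : Bool := !pvIsOp t && !pvIsNum t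

lemma pv_add_filter (q : String → Bool) (S : List String) (t : String) :
    (PySem.Set.add S t).filter q
      = if q t then PySem.Set.add (S.filter q) t else S.filter q := by
  simp only [PySem.Set.add, PySem.Set.contains, List.contains_eq_mem]
  by_cases hS : t ∈ S <;> by_cases hq : q t = true <;>
    simp [hS, hq, List.mem_filter, List.filter_append]

def pvFilters (S : List String) :
    PySem.Set String × PySem.Set String × PySem.Set String :=
  (S.filter pvIsParam, S.filter pvIsOp, S.filter pvIsCoef)

lemma pv_fold_toks (toks : List String) : ∀ S : List String,
    toks.foldl pvStepA (pvFilters S) = pvFilters (toks.foldl PySem.Set.add S) := by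
  induction toks with
  | nil => intro S; rfl
  | cons t toks ih =>
    intro S
    have hstep : pvStepA (pvFilters S) t = pvFilters (PySem.Set.add S t) := by
      simp only [pvStepA, pvFilters]
      by_cases hop : pvIsOp t = true
      · have hmem : t ∈ pvOperators := by
          simpa [pvIsOp, PySem.Set.contains, List.contains_eq_mem] using hop
        simp [pv_add_filter, pvIsParam, pvIsOp, pvIsCoef, hop, hmem,
          PySem.Set.contains, List.contains_eq_mem]
      · have hmem : t ∉ pvOperators := by
          simpa [pvIsOp, PySem.Set.contains, List.contains_eq_mem] using hop
        by_cases hnum : pvIsNum t = true <;>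
          simp [pv_add_filter, pvIsParam, pvIsOp, pvIsCoef, hnum, hmem,
            PySem.Set.contains, List.contains_eq_mem]
    simp only [List.foldl_cons, hstep, ih]

lemma pv_fold_formulas (fs : List String) : ∀ S : List String,
    fs.foldl (fun st formula => (PySem.Str.split₀ formula).foldl pvStepA st) (pvFilters S)
      = pvFilters (fs.foldl
          (fun acc formula => (PySem.Str.split₀ formula).foldl PySem.Set.add acc) S) := by
  induction fs with
  | nil => intro S; rfl
  | cons f fs ih =>
    intro S
    simp only [List.foldl_cons, pv_fold_toks, ih]

-- operator literals are not numeric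
lemma pv_op_not_num (t : String) (h : pvIsOp t = true) : pvIsNum t = false := by
  have hofl : PySem.Set.ofList ["*", "+", "**", "-", "log"] = ["*", "+", "**", "-", "log"] := by
    decide
  have h' : t ∈ (["*", "+", "**", "-", "log"] : List String) := by
    simpa [pvIsOp, pvOperators, PySem.Set.contains, List.contains_eq_mem, hofl] using h
  simp only [List.mem_cons, List.not_mem_nil, or_false] at h'
  rcases h' with rfl | rfl | rfl | rfl | rfl <;> decide

theorem extractInfoFormulas_spec : Claim_equal_extractInfoFormulas := by
  intro formulas _
  unfold Spec_extractInfoFormulas extractInfoFormulas extractInfoFormulas_alt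
  have h0 : (PySem.Set.empty, PySem.Set.empty, PySem.Set.empty) = pvFilters PySem.Set.empty := rfl
  rw [h0, pv_fold_formulas]
  set tokens := formulas.foldl
    (fun acc formula => (PySem.Str.split₀ formula).foldl PySem.Set.add acc) PySem.Set.empty
    with htok
  simp only [pvFilters]
  -- operators
  have hop : PySem.Set.inter tokens pvOperators = tokens.filter pvIsOp := rfl
  -- coefficients
  have hcoef : tokens.filter pvIsNum = tokens.filter pvIsCoef := by
    apply List.filter_congr
    intro t _
    by_cases h : pvIsOp t = true
    · simp [pvIsCoef, h, pv_op_not_num t h]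
    · have h' : pvIsOp t = false := by simpa using h
      simp [pvIsCoef, h']
  -- parameters
  have hparam :
      PySem.Set.diff (PySem.Set.diff tokens (List.filter pvIsOp tokens))
        (List.filter pvIsCoef tokens) = tokens.filter pvIsParam := by
    simp only [PySem.Set.diff, PySem.Set.contains, List.filter_filter]
    apply List.filter_congr
    intro t ht
    simp only [List.contains_eq_mem, List.mem_filter, ht, true_and, pvIsParam, pvIsCoef]
    by_cases hnum : pvIsNum t = true <;> by_cases hop2 : pvIsOp t = true <;>
      simp [hnum, hop2]
  rw [hop, hcoef, hparam]
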